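-- pv_equiv track=rewrite | github.com/masahiro-999/abc_python | src/atcoder/nikkei2019-2-qual/nikkei2019_2_qual_b.py | check
-- ===== SOURCE A (Python) =====
-- mod = 998244353
--
-- def check(d):
--
--     if d[0] != 0:
--         return 0
--     if len(d) == 1:
--         return 1
--     d = d[1:]
--     d.sort()
--     count = 1
--     prev = d[0]
--     if prev != 1:
--         return 0
--     ans = 1
--     prev_count = 1
--     for i in d[1:]:
--         if prev == i:
--             count += 1
--         elif prev +1 == i:
--             ans = (ans * (prev_count** count)) % mod
--             prev = i
--             prev_count = count
--             count = 1
--         else: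
--             return 0
--
--     ans = (ans * (prev_count** count)) % mod
--
--     return ans
-- ===== SOURCE B (Python) =====
-- mod = 998244353
--
-- def check(d):
--     if d[0] != 0:
--         return 0
--     cnt = {}
--     for x in d[1:]:
--         cnt[x] = cnt.get(x, 0) + 1
--     ans = 1
--     prev_count = 1
--     k = 1
--     while cnt:
--         c = cnt.pop(k, 0)
--         if c == 0:
--             return 0
--         ans = ans * pow(prev_count, c, mod) % mod
--         prev_count = c
--         k += 1
--     return ans
-- ===== Notes on version B (the rewrite author's own statement) =====
-- stated objective: alternative
-- what changed: A sorts the tail and scans equal-value runs accumulating run lengths; B never sorts: it builds a hash-map counter of the tail in one pass and then walks the levels 1,2,3,... popping each level's count and multiplying pow(prev_count, count, mod), replacing the O(n log n) sort-and-scan by O(n) counting plus a walk over the distinct levels.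
import Mathlib
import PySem

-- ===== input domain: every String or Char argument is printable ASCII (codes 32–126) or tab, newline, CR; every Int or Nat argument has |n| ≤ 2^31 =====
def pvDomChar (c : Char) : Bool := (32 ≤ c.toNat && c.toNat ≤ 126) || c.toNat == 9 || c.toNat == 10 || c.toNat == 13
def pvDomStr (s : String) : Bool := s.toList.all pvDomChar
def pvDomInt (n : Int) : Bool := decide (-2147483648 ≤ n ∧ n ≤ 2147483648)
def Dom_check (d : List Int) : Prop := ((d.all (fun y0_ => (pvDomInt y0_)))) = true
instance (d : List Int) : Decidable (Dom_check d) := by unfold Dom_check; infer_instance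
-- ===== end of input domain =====

-- B replaces A's sort-then-scan-runs pass by a Counter built in one pass over the tail,
-- followed by a walk over the levels 1,2,3,… popping each level's count (alternative algorithm).

-- ===== PORT A =====
def pvmod : Int := 998244353

-- A's for-loop over the sorted tail's rest; `none` encodes the `return 0` inside the loop;
-- state = (count, prev, ans, prev_count); in every reachable state count ≥ 1, so `.toNat`
-- on the exponent of `prev_count ** count` is exact there
def checkLoopA : List Int → Int → Int → Int → Int → Option (Int × Int × Int × Int)
  | [], count, prev, ans, pc => some (count, prev, ans, pc)
  | i :: rest, count, prev, ans, pc =>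
    if prev = i then checkLoopA rest (count + 1) prev ans pc
    else if prev + 1 = i then
      checkLoopA rest 1 i (PySem.Int.mod (ans * pc ^ count.toNat) pvmod) count
    else none

-- the code after the loop: `ans = (ans * prev_count ** count) % mod; return ans`
-- (`none`, the in-loop `return 0`, propagates as 0)
def checkFinish : Option (Int × Int × Int × Int) → Int
  | none => 0
  | some (count, _prev, ans, pc) => PySem.Int.mod (ans * pc ^ count.toNat) pvmod

def check (d : List Int) : Int :=
  match PySem.List.pyGet? d 0 with
  | none => 0      -- d[0] raises IndexError on d = []; excluded by Pre_check
  | some d0 =>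
    if d0 ≠ 0 then 0
    else if d.length = 1 then 1
    else
      -- d = d[1:]; d.sort()
      let s := PySem.List.sorted (PySem.List.slice d (some 1)) (fun x => x)
      match PySem.List.pyGet? s 0 with
      | none => 0  -- unreachable: len(d) ≥ 2, so the sorted tail is nonempty
      | some prev =>
        if prev ≠ 1 then 0
        else checkFinish (checkLoopA (PySem.List.slice s (some 1)) 1 prev 1 1)

-- ===== PORT B =====
-- termination helper for the while-loop: erasing a present key shrinks the dict
theorem pvEraseSizeLt {κ ν : Type} [BEq κ] (d : PySem.Dict κ ν) (k : κ)
    (h : d.get? k ≠ none) : (d.erase k).size < d.size := by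
  simp only [PySem.Dict.get?, PySem.Dict.erase, PySem.Dict.size] at *
  rcases hf : List.find? (fun p => p.1 == k) d.items with _ | p
  · simp [hf] at h
  · have hp := List.find?_some hf
    have hm := List.mem_of_find?_eq_some hf
    exact List.length_filter_lt_length_iff_exists.mpr ⟨p, hm, by simp [hp]⟩

-- B's while-loop; Python's `cnt.pop(k, 0)` = lookup with default 0 then erase of the key;
-- `while cnt:` = size ≠ 0; in every reachable state c ≥ 1, so `.toNat` on pow's exponent is exact
def checkLoopB (cnt : PySem.Dict Int Int) (ans pc k : Int) : Int :=
  if cnt.size = 0 then ans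
  else if cnt.getD k 0 = 0 then 0
  else checkLoopB (cnt.erase k)
    (PySem.Int.mod (ans * PySem.Int.powMod pc (cnt.getD k 0).toNat pvmod) pvmod)
    (cnt.getD k 0) (k + 1)
termination_by cnt.size
decreasing_by
  exact pvEraseSizeLt cnt k (fun hn => by simp [PySem.Dict.getD_of_get?_eq_none _ _ hn] at *)

def check_alt (d : List Int) : Int :=
  match PySem.List.pyGet? d 0 with
  | none => 0      -- d[0] raises IndexError on d = []; excluded by Pre_check
  | some d0 =>
    if d0 ≠ 0 then 0
    else
      let cnt := (PySem.List.slice d (some 1)).foldl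
        (fun cnt x => cnt.insert x (cnt.getD x 0 + 1)) PySem.Dict.empty
      checkLoopB cnt 1 1 1

-- ===== PRECONDITION & SPEC =====
-- Pre_ excludes only the empty list, on which Python A (and B) raise IndexError at d[0]
def Pre_check (d : List Int) : Prop := d ≠ []
instance (d : List Int) : Decidable (Pre_check d) := by unfold Pre_check; infer_instance
def pvWitness_check : List Int := [0, 1, 1, 2]

def Spec_check (d : List Int) (out : Int) : Prop := out = check_alt d
instance (d : List Int) (out : Int) : Decidable (Spec_check d out) := by unfold Spec_check; infer_instance

-- ===== CLAIM (what is proved, stated in full; the proofs are below) =====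
def Claim_equal_check : Prop := ∀ (d : List Int), Dom_check d → Pre_check d → Spec_check d (check d)

-- ===== LEMMAS AND PROOFS =====
theorem pvmod_pos : (0 : Int) < pvmod := by norm_num [pvmod]

-- A multiplies by the full power and reduces; B multiplies by the reduced power: same residue
theorem pvModMul (a b : Int) (e : Nat) :
    PySem.Int.mod (a * PySem.Int.powMod b e pvmod) pvmod = PySem.Int.mod (a * b ^ e) pvmod := by
  rw [PySem.Int.powMod_eq]
  rw [PySem.Int.mod_eq_emod_of_pos pvmod_pos, PySem.Int.mod_eq_emod_of_pos pvmod_pos,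
      PySem.Int.mod_eq_emod_of_pos pvmod_pos]
  conv_lhs => rw [Int.mul_emod]
  conv_rhs => rw [Int.mul_emod]
  simp [Int.emod_emod_of_dvd]

theorem pvGet?Erase (d : PySem.Dict Int Int) (k j : Int) :
    (d.erase k).get? j = if j = k then none else d.get? j := by
  obtain ⟨items⟩ := d
  simp only [PySem.Dict.erase, PySem.Dict.get?]
  induction items with
  | nil => simp
  | cons p rest ih =>
    by_cases hpk : p.1 = k
    · rw [List.filter_cons_of_neg (by simp [hpk])]
      rw [ih]
      by_cases hjk : j = k
      · simp [hjk]
      · rw [if_neg hjk, if_neg hjk, List.find?_cons_of_neg (by simp [hpk]; omega)]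
    · rw [List.filter_cons_of_pos (by simp [hpk])]
      by_cases hpj : p.1 = j
      · have hjk : ¬ j = k := fun h => hpk (by rw [hpj, h])
        rw [List.find?_cons_of_pos (by simp [hpj]), if_neg hjk,
            List.find?_cons_of_pos (by simp [hpj])]
      · rw [List.find?_cons_of_neg (by simp [hpj]), ih]
        by_cases hjk : j = k
        · simp [hjk]
        · rw [if_neg hjk, if_neg hjk, List.find?_cons_of_neg (by simp [hpj])]

theorem pvSizeNeZero (d : PySem.Dict Int Int) (k : Int) (h : d.get? k ≠ none) : d.size ≠ 0 := by
  obtain ⟨items⟩ := d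
  cases items with
  | nil => simp [PySem.Dict.get?] at h
  | cons p rest => simp [PySem.Dict.size]

theorem pvGet?OfSizeZero (d : PySem.Dict Int Int) (h : d.size = 0) (k : Int) : d.get? k = none := by
  obtain ⟨items⟩ := d
  cases items with
  | nil => simp [PySem.Dict.get?]
  | cons p rest => simp [PySem.Dict.size] at h

theorem pvSizeZeroOfAllNone (d : PySem.Dict Int Int) (h : ∀ k, d.get? k = none) : d.size = 0 := by
  obtain ⟨items⟩ := d
  cases items with
  | nil => simp [PySem.Dict.size]
  | cons p rest =>
    have := h p.1
    simp [PySem.Dict.get?, List.find?] at this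

-- checkLoopB only looks at the dict through get? (lookups, emptiness, erasure)
theorem pvLoopBExt (n : Nat) : ∀ (c1 c2 : PySem.Dict Int Int) (ans pc k : Int),
    c1.size ≤ n → (∀ j, c1.get? j = c2.get? j) →
    checkLoopB c1 ans pc k = checkLoopB c2 ans pc k := by
  induction n with
  | zero =>
    intro c1 c2 ans pc k hn h
    have h1 : c1.size = 0 := Nat.le_zero.mp hn
    have h2 : c2.size = 0 :=
      pvSizeZeroOfAllNone c2 (fun j => by rw [← h j]; exact pvGet?OfSizeZero c1 h1 j)
    conv_lhs => rw [checkLoopB]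
    conv_rhs => rw [checkLoopB]
    rw [if_pos h1, if_pos h2]
  | succ n ih =>
    intro c1 c2 ans pc k hn h
    by_cases h1 : c1.size = 0
    · have h2 : c2.size = 0 :=
        pvSizeZeroOfAllNone c2 (fun j => by rw [← h j]; exact pvGet?OfSizeZero c1 h1 j)
      conv_lhs => rw [checkLoopB]
      conv_rhs => rw [checkLoopB]
      rw [if_pos h1, if_pos h2]
    · have h2 : ¬ c2.size = 0 := by
        intro h2
        exact h1 (pvSizeZeroOfAllNone c1 (fun j => by rw [h j]; exact pvGet?OfSizeZero c2 h2 j))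
      have hg : c1.getD k 0 = c2.getD k 0 := by
        rw [PySem.Dict.getD_eq_get?_getD, PySem.Dict.getD_eq_get?_getD, h k]
      conv_lhs => rw [checkLoopB]
      conv_rhs => rw [checkLoopB]
      rw [if_neg h1, if_neg h2, ← hg]
      by_cases hc : c1.getD k 0 = 0
      · rw [if_pos hc, if_pos hc]
      · rw [if_neg hc, if_neg hc]
        have hk : c1.get? k ≠ none := fun hn' => hc (PySem.Dict.getD_of_get?_eq_none _ _ hn')
        refine ih (c1.erase k) (c2.erase k) _ _ _ ?_ ?_
        · have := pvEraseSizeLt c1 k hk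
          omega
        · intro j
          rw [pvGet?Erase, pvGet?Erase]
          split
          · rfl
          · exact h j

theorem pvGet?Counter (xs : List Int) (j : Int) :
    (PySem.Dict.counter xs).get? j = if j ∈ xs then some (xs.count j : Int) else none := by
  by_cases hj : j ∈ xs
  · have hc : (PySem.Dict.counter xs).contains j = true := by
      rw [PySem.Dict.contains_counter]
      simp [hj]
    rw [PySem.Dict.contains_eq_isSome_get?] at hc
    rcases hg : (PySem.Dict.counter xs).get? j with _ | v
    · rw [hg] at hc; simp at hc
    · have := PySem.Dict.getD_of_get?_eq_some (PySem.Dict.counter xs) (0 : Int) hg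
      rw [PySem.Dict.getD_counter] at this
      simp [hj, ← this]
  · rw [if_neg hj]
    rw [PySem.Dict.get?_eq_none_iff_not_mem_keys, PySem.Dict.keys_counter, PySem.Set.mem_ofList]
    exact hj

theorem pvCounterPerm {xs ys : List Int} (h : xs.Perm ys) (j : Int) :
    (PySem.Dict.counter xs).get? j = (PySem.Dict.counter ys).get? j := by
  rw [pvGet?Counter, pvGet?Counter, h.count_eq j]
  by_cases hj : j ∈ xs
  · simp [hj, h.mem_iff.mp hj]
  · have hy : j ∉ ys := fun hy => hj (h.mem_iff.mpr hy)
    simp [hj, hy]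

-- the while-loop hits a missing level: nonempty dict, key k absent → 0
theorem pvLoopBStuck (cnt : PySem.Dict Int Int) (ans pc k : Int)
    (hs : cnt.size ≠ 0) (hk : cnt.get? k = none) : checkLoopB cnt ans pc k = 0 := by
  rw [checkLoopB]
  rw [if_neg hs, PySem.Dict.getD_of_get?_eq_none _ _ hk, if_pos rfl]

-- a key smaller than the current level can never be popped → 0
theorem pvLoopBSmall (n : Nat) : ∀ (cnt : PySem.Dict Int Int) (ans pc k j : Int),
    cnt.size ≤ n → cnt.get? j ≠ none → j < k → checkLoopB cnt ans pc k = 0 := by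
  induction n with
  | zero =>
    intro cnt ans pc k j hn hj _
    exact absurd (pvGet?OfSizeZero cnt (Nat.le_zero.mp hn) j) hj
  | succ n ih =>
    intro cnt ans pc k j hn hj hjk
    have hs : cnt.size ≠ 0 := pvSizeNeZero cnt j hj
    rw [checkLoopB, if_neg hs]
    by_cases hc : cnt.getD k 0 = 0
    · rw [if_pos hc]
    · rw [if_neg hc]
      have hk : cnt.get? k ≠ none := fun hn' => hc (PySem.Dict.getD_of_get?_eq_none _ _ hn')
      refine ih (cnt.erase k) _ _ (k + 1) j ?_ ?_ (by omega)
      · have := pvEraseSizeLt cnt k hk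
        omega
      · rw [pvGet?Erase, if_neg (by omega : ¬ j = k)]
        exact hj

-- erasing the fully-counted current value from the counter = the counter of the rest
theorem pvEraseCounter (n : Nat) (v : Int) (ys : List Int) (hv : v ∉ ys) (j : Int) :
    ((PySem.Dict.counter (List.replicate n v ++ ys)).erase v).get? j =
      (PySem.Dict.counter ys).get? j := by
  rw [pvGet?Erase, pvGet?Counter, pvGet?Counter]
  by_cases hjv : j = v
  · simp [hjv, hv]
  · have hvj : ¬ v = j := fun h => hjv h.symm
    simp only [hjv, if_false, List.mem_append, List.mem_replicate, List.count_append,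
      List.count_replicate]
    by_cases hjy : j ∈ ys
    · simp [hjy, hvj]
    · simp [hjy, hjv]

-- MAIN: A's run-length scan over the remaining sorted values = B's level walk over
-- the counter of (the current run so far ++ the remaining values)
theorem pvMainLoop (s : List Int) : ∀ (count prev ans pc : Int),
    s.Pairwise (· ≤ ·) → 1 ≤ count → (∀ x ∈ s, prev ≤ x) →
    checkFinish (checkLoopA s count prev ans pc) =
      checkLoopB (PySem.Dict.counter (List.replicate count.toNat prev ++ s)) ans pc prev := by
  induction s with
  | nil =>
    intro count prev ans pc _ hc _
    have hmem : prev ∈ List.replicate count.toNat prev ++ ([] : List Int) := by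
      simp [List.mem_replicate]
      omega
    have hg : (PySem.Dict.counter (List.replicate count.toNat prev ++ [])).get? prev =
        some count := by
      rw [pvGet?Counter, if_pos hmem]
      simp [Int.toNat_of_nonneg (by omega : (0:Int) ≤ count)]
    have hgd : (PySem.Dict.counter (List.replicate count.toNat prev ++ [])).getD prev 0 = count :=
      PySem.Dict.getD_of_get?_eq_some _ _ hg
    conv_rhs => rw [checkLoopB]
    rw [if_neg (pvSizeNeZero _ prev (by rw [hg]; simp)), hgd,
        if_neg (by omega : ¬ count = 0)]
    have hext := pvLoopBExt _
      ((PySem.Dict.counter (List.replicate count.toNat prev ++ ([] : List Int))).erase prev)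
      (PySem.Dict.counter ([] : List Int))
      (PySem.Int.mod (ans * PySem.Int.powMod pc count.toNat pvmod) pvmod) count (prev + 1)
      (le_refl _)
      (pvEraseCounter count.toNat prev [] (by simp))
    rw [hext]
    conv_rhs => rw [checkLoopB]
    rw [if_pos (by decide : (PySem.Dict.counter ([] : List Int)).size = 0)]
    simp only [checkLoopA, checkFinish]
    exact (pvModMul ans pc count.toNat).symm
  | cons i rest ih =>
    intro count prev ans pc hsort hc hge
    have hpi : prev ≤ i := hge i (by simp)
    have hrest : rest.Pairwise (· ≤ ·) := hsort.tail
    have hir : ∀ x ∈ rest, i ≤ x := fun x hx => List.rel_of_pairwise_cons hsort hx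
    by_cases h1 : prev = i
    · simp only [checkLoopA]
      rw [if_pos h1]
      have hl : List.replicate count.toNat prev ++ i :: rest =
          List.replicate (count + 1).toNat prev ++ rest := by
        rw [(by omega : (count + 1).toNat = count.toNat + 1), List.replicate_succ']
        simp [h1]
      rw [hl]
      exact ih (count + 1) prev ans pc hrest (by omega) (fun x hx => le_trans hpi (hir x hx))
    · have hgt : ∀ x ∈ i :: rest, prev < x := by
        intro x hx
        rcases List.mem_cons.mp hx with rfl | hx
        · omega
        · have := hir x hx; omega
      have hcnt0 : (i :: rest).count prev = 0 := by
        rw [List.count_eq_zero]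
        intro hmem
        have := hgt prev hmem
        omega
      have hg : (PySem.Dict.counter (List.replicate count.toNat prev ++ i :: rest)).get? prev =
          some count := by
        rw [pvGet?Counter,
            if_pos (by simp [List.mem_replicate]; omega)]
        simp [List.count_append, hcnt0,
          Int.toNat_of_nonneg (by omega : (0:Int) ≤ count)]
      have hgd := PySem.Dict.getD_of_get?_eq_some _ (0 : Int) hg
      have hnotin : prev ∉ i :: rest := fun hmem => by have := hgt prev hmem; omega
      have hext := pvLoopBExt _
        ((PySem.Dict.counter (List.replicate count.toNat prev ++ i :: rest)).erase prev)
        (PySem.Dict.counter (i :: rest))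
        (PySem.Int.mod (ans * PySem.Int.powMod pc count.toNat pvmod) pvmod) count (prev + 1)
        (le_refl _)
        (pvEraseCounter count.toNat prev (i :: rest) hnotin)
      conv_rhs => rw [checkLoopB]
      rw [if_neg (pvSizeNeZero _ prev (by rw [hg]; simp)), hgd,
          if_neg (by omega : ¬ count = 0), hext]
      by_cases h2 : prev + 1 = i
      · simp only [checkLoopA]
        rw [if_neg h1, if_pos h2, pvModMul]
        have hi1 := ih 1 i (PySem.Int.mod (ans * pc ^ count.toNat) pvmod) count hrest
          (le_refl 1) hir
        simp only [show Int.toNat 1 = 1 from rfl, List.replicate_one,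
          List.singleton_append] at hi1
        rw [h2, hi1]
      · simp only [checkLoopA]
        rw [if_neg h1, if_neg h2]
        have hgt2 : ∀ x ∈ i :: rest, prev + 1 < x := by
          intro x hx
          rcases List.mem_cons.mp hx with rfl | hx
          · omega
          · have := hir x hx; omega
        refine Eq.symm ?_
        refine pvLoopBStuck _ _ _ _ ?_ ?_
        · refine pvSizeNeZero _ i ?_
          rw [pvGet?Counter]
          simp
        · rw [pvGet?Counter]
          exact if_neg (fun hmem => by have := hgt2 _ hmem; omega)

theorem pvGet?Cons0 (x : Int) (t : List Int) : PySem.List.pyGet? (x :: t) 0 = some x := by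
  simp [PySem.List.pyGet?, PySem.List.pyIdx?]

theorem pvSortedPairwise (t : List Int) :
    (PySem.List.sorted t (fun x => x)).Pairwise (· ≤ ·) := by
  have := PySem.List.sorted_pairwise t (fun x => x)
  simpa using this

theorem pvCheckEq (d : List Int) (hd : d ≠ []) : check d = check_alt d := by
  obtain ⟨d0, t, rfl⟩ := List.exists_cons_of_ne_nil hd
  by_cases h0 : d0 = 0
  · subst h0
    have hslice : PySem.List.slice ((0:Int) :: t) (some 1) = t := by
      rw [PySem.List.slice_from ((0:Int) :: t) (by norm_num : (0:Int) ≤ (1:Int))]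
      simp
    simp only [check, check_alt, pvGet?Cons0, hslice]
    norm_num
    cases t with
    | nil =>
      rw [checkLoopB]
      simp [PySem.Dict.empty, PySem.Dict.size]
    | cons a t' =>
      rw [if_neg (List.cons_ne_nil a t'), PySem.Dict.foldl_insert_getD_add_one_eq_counter]
      rcases hsrt : PySem.List.sorted (a :: t') (fun x => x) with _ | ⟨p, s'⟩
      · exact absurd ((PySem.List.sorted_eq_nil_iff (a :: t') (fun x => x) false).mp hsrt)
          (by simp)
      · have hperm : (a :: t').Perm (p :: s') := by
          have hp := PySem.List.sorted_perm (a :: t') (fun x => x) false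
          rw [hsrt] at hp
          exact hp.symm
        have hpair : (p :: s').Pairwise (· ≤ ·) := by
          have hq := pvSortedPairwise (a :: t')
          rw [hsrt] at hq
          exact hq
        have hBtoS : checkLoopB (PySem.Dict.counter (a :: t')) 1 1 1 =
            checkLoopB (PySem.Dict.counter (p :: s')) 1 1 1 :=
          pvLoopBExt _ _ _ _ _ _ (le_refl _) (pvCounterPerm hperm)
        simp only [pvGet?Cons0]
        rw [hBtoS]
        have hslice2 : PySem.List.slice (p :: s') (some 1) = s' := by
          rw [PySem.List.slice_from (p :: s') (by norm_num : (0:Int) ≤ (1:Int))]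
          simp
        by_cases hp1 : p = 1
        · subst hp1
          rw [if_pos (by norm_num : (1:Int) = 1), hslice2]
          have hmain := pvMainLoop s' 1 1 1 1 hpair.tail (le_refl _)
            (fun x hx => List.rel_of_pairwise_cons hpair hx)
          simp only [show Int.toNat 1 = 1 from rfl, List.replicate_one,
            List.singleton_append] at hmain
          exact hmain
        · rw [if_neg hp1]
          have hple : ∀ x ∈ p :: s', p ≤ x := by
            intro x hx
            rcases List.mem_cons.mp hx with rfl | hx
            · exact le_refl x
            · exact List.rel_of_pairwise_cons hpair hx
          rcases lt_or_gt_of_ne hp1 with hlt | hgt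
          · exact (pvLoopBSmall _ _ 1 1 1 p (le_refl _)
              (by rw [pvGet?Counter]; simp) hlt).symm
          · refine Eq.symm ?_
            refine pvLoopBStuck _ 1 1 1 ?_ ?_
            · exact pvSizeNeZero _ p (by rw [pvGet?Counter]; simp)
            · rw [pvGet?Counter]
              exact if_neg (fun hmem => by have := hple 1 hmem; omega)
  · simp only [check, check_alt, pvGet?Cons0]
    rw [if_pos h0, if_pos h0]

-- ===== VERDICT (by name: the statement is the Claim_ definition above) =====
theorem check_spec : Claim_equal_check := by
  intro d _ hpre
  unfold Spec_check
  exact pvCheckEq d hpre
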